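-- pv_equiv track=rewrite | github.com/bsmi021/crewai_escape_room | src/escape_room_sim/simulation/simple_engine.py | check_solution_found
-- ===== SOURCE A (Python) =====
-- def check_solution_found(result_text: str) -> bool:
--     """Check if a solution was found in the results."""
--     success_indicators = [
--         "SOLUTION FOUND",
--         "COMPLETE SUCCESS",
--         "ESCAPE SUCCESSFUL",
--         "successfully escaped",
--         "solution discovered",
--         "puzzle solved",
--         "escape achieved"
--     ]
--
--     result_lower = result_text.lower()
--     return any(indicator.lower() in result_lower for indicator in success_indicators)
-- ===== SOURCE B (Python) =====
-- _INDICATORS = [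
--     "solution found",
--     "complete success",
--     "escape successful",
--     "successfully escaped",
--     "solution discovered",
--     "puzzle solved",
--     "escape achieved",
-- ]
--
--
-- def check_solution_found(result_text: str) -> bool:
--     """Single left-to-right scan: at each position try to match one of the
--     (pre-lowercased) indicators, lowercasing text characters on the fly,
--     instead of building a lowercase copy and running seven substring tests."""
--     n = len(result_text)
--     for i in range(n):
--         for ind in _INDICATORS:
--             if _match_at(result_text, i, ind):
--                 return True
--     return False
--
--
-- def _match_at(text: str, i: int, ind: str) -> bool:
--     if i + len(ind) > len(text):
--         return False
--     for j in range(len(ind)):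
--         if text[i + j].lower() != ind[j]:
--             return False
--     return True
-- ===== Notes on version B (the rewrite author's own statement) =====
-- stated objective: alternative
-- what changed: Instead of lowercasing the whole text and running seven separate substring-membership tests, B makes one left-to-right scan over the text, at each position trying to match one of the pre-lowercased indicators while lowercasing text characters on the fly.
import Mathlib
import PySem

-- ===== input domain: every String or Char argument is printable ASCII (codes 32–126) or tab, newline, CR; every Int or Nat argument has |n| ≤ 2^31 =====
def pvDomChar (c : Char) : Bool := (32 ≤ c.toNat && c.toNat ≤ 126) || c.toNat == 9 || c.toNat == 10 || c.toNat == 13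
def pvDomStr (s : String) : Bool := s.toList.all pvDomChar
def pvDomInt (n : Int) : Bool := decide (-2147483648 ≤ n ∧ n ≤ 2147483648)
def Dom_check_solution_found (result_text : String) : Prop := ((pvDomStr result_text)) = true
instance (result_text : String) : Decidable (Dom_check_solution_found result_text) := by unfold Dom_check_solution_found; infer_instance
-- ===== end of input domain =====

-- B replaces "lowercase the whole text, then seven substring tests" by one left-to-right
-- scan matching the pre-lowercased indicators in place (alternative decomposition, same cost).

-- ===== PORT A =====
def pvIndicatorsA : List String :=
  ["SOLUTION FOUND", "COMPLETE SUCCESS", "ESCAPE SUCCESSFUL", "successfully escaped",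
   "solution discovered", "puzzle solved", "escape achieved"]

def check_solution_found (result_text : String) : Bool :=
  let result_lower := PySem.Str.lower result_text
  pvIndicatorsA.any (fun indicator => PySem.Str.isIn (PySem.Str.lower indicator) result_lower)

-- ===== PORT B =====
def pvIndicatorsB : List (List Char) :=
  ["solution found".toList, "complete success".toList, "escape successful".toList,
   "successfully escaped".toList, "solution discovered".toList, "puzzle solved".toList,
   "escape achieved".toList]

-- _match_at: compare text chars (lowercased on the fly) against the indicator
def pvMatchAt : List Char → List Char → Bool
  | _, [] => true
  | [], _ :: _ => false
  | c :: s, d :: t => (PySem.Chars.lowerChar c == d) && pvMatchAt s t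

-- the `for i in range(n)` scan over positions, as recursion over suffixes
def pvScan : List Char → Bool
  | [] => false
  | c :: s => pvIndicatorsB.any (fun ind => pvMatchAt (c :: s) ind) || pvScan s

def check_solution_found_alt (result_text : String) : Bool :=
  pvScan result_text.toList

-- ===== PRECONDITION & SPEC =====
def Spec_check_solution_found (result_text : String) (out : Bool) : Prop := out = check_solution_found_alt result_text
instance (result_text : String) (out : Bool) : Decidable (Spec_check_solution_found result_text out) := by unfold Spec_check_solution_found; infer_instance

-- ===== CLAIM (what is proved, stated in full; the proofs are below) =====
def Claim_equal_check_solution_found : Prop := ∀ (result_text : String), Dom_check_solution_found result_text → Spec_check_solution_found result_text (check_solution_found result_text)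

-- ===== LEMMAS AND PROOFS =====

theorem pvMatchAt_iff (s t : List Char) :
    pvMatchAt s t = true ↔ t <+: s.map PySem.Chars.lowerChar := by
  induction t generalizing s with
  | nil => simp [pvMatchAt]
  | cons d t ih =>
    cases s with
    | nil => simp [pvMatchAt]
    | cons c s =>
      simp only [pvMatchAt, Bool.and_eq_true, beq_iff_eq, ih, List.map_cons,
        List.cons_prefix_cons]
      constructor <;> rintro ⟨h1, h2⟩ <;> exact ⟨h1.symm, h2⟩

theorem pvScan_iff (s : List Char) :
    pvScan s = true ↔ ∃ ind ∈ pvIndicatorsB, ind <:+: s.map PySem.Chars.lowerChar := by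
  induction s with
  | nil =>
    simp only [pvScan, List.map_nil]
    constructor
    · intro h; cases h
    · rintro ⟨i, hi, hp⟩
      rw [List.infix_nil] at hp
      subst hp
      revert hi; decide
  | cons c s ih =>
    simp only [pvScan, Bool.or_eq_true, List.any_eq_true, ih, pvMatchAt_iff,
      List.map_cons, List.infix_cons_iff]
    constructor
    · rintro (⟨i, hi, hp⟩ | ⟨i, hi, hp⟩) <;> exact ⟨i, hi, by tauto⟩
    · rintro ⟨i, hi, hp | hp⟩
      · exact Or.inl ⟨i, hi, hp⟩
      · exact Or.inr ⟨i, hi, hp⟩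

theorem pvIndicators_map :
    pvIndicatorsA.map (fun ind => (PySem.Str.lower ind).toList) = pvIndicatorsB := by
  decide

theorem pv_lower_toList (s : String) :
    (PySem.Str.lower s).toList = s.toList.map PySem.Chars.lowerChar := by
  simp [PySem.Str.toList_lower, PySem.Chars.lower]

-- ===== VERDICT (by name: the statement is the Claim_ definition above) =====
theorem check_solution_found_spec : Claim_equal_check_solution_found := by
  intro rt _
  unfold Spec_check_solution_found check_solution_found check_solution_found_alt
  rw [Bool.eq_iff_iff]
  simp only [List.any_eq_true, PySem.Str.isIn_iff_infix, pv_lower_toList, pvScan_iff]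
  constructor
  · rintro ⟨i, hi, hp⟩
    refine ⟨(PySem.Str.lower i).toList, ?_, ?_⟩
    · rw [← pvIndicators_map]; exact List.mem_map_of_mem hi
    · rw [pv_lower_toList]; exact hp
  · rintro ⟨i, hi, hp⟩
    rw [← pvIndicators_map] at hi
    obtain ⟨j, hj, rfl⟩ := List.mem_map.mp hi
    rw [pv_lower_toList] at hp
    exact ⟨j, hj, hp⟩
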